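-- pv_equiv track=rewrite | github.com/lgiardina47-lab/tramelle_storefront | dati_venditori_nuova/seller_extract.py | _is_company_website_host
-- ===== SOURCE A (Python) =====
-- from typing import Any, Dict, Iterable, List, Optional, Set, Tuple
--
-- _EXCLUDED_WEBSITE_HOSTS: Tuple[str, ...] = (
--     "instagram.com",
--     "facebook.com",
--     "fb.com",
--     "twitter.com",
--     "x.com",
--     "linkedin.com",
--     "youtube.com",
--     "youtu.be",
--     "pittimmagine.com",
--     "pittiimmagine.com",
--     "taste.pittimmagine.com",
--     "www.pittimmagine.com",
-- )
--
-- def _hostname_key(netloc: str) -> str: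
--     h = (netloc or "").lower()
--     if h.startswith("www."):
--         return h[4:]
--     return h
--
-- def _is_company_website_host(netloc: str) -> bool:
--     key = _hostname_key(netloc)
--     if not key:
--         return False
--     for ex in _EXCLUDED_WEBSITE_HOSTS:
--         if key == ex or key.endswith("." + ex):
--             return False
--     return True
-- ===== SOURCE B (Python) =====
-- _EXCLUDED = frozenset(
--     "instagram.com facebook.com fb.com twitter.com x.com linkedin.com "
--     "youtube.com youtu.be pittimmagine.com pittiimmagine.com "
--     "taste.pittimmagine.com www.pittimmagine.com".split()
-- )
--
--
-- def _is_company_website_host(netloc: str) -> bool: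
--     h = (netloc or "").lower()
--     suffix = h[4:] if h[:4] == "www." else h
--     if not suffix:
--         return False
--     while True:
--         if suffix in _EXCLUDED:
--             return False
--         dot = suffix.find(".")
--         if dot < 0:
--             return True
--         suffix = suffix[dot + 1:]
-- ===== Notes on version B (the rewrite author's own statement) =====
-- stated objective: alternative
-- what changed: Instead of scanning the 12-entry exclusion tuple testing equality-or-dotted-suffix per entry, B walks the hostname's dot-boundary suffixes (whole key, then past the first dot each round via str.find and slicing) and tests each for membership in a frozenset built once.
import Mathlib
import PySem

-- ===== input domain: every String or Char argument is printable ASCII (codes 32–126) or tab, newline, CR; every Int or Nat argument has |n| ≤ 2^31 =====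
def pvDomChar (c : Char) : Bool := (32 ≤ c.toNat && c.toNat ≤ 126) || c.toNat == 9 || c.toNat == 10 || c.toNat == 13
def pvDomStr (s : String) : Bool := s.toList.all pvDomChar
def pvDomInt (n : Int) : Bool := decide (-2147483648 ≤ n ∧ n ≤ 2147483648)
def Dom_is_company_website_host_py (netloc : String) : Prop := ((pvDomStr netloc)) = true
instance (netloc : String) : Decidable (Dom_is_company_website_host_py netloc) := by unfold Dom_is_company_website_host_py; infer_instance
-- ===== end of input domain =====

-- B replaces A's scan of the exclusion tuple with '== or endswith' per entry by a loop that walks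
-- the dot-boundary suffixes of the hostname (full key, then past the first dot each round) and looks
-- each one up in a frozenset built once (objective: alternative; same return value).

-- ===== PORT A =====
def pvExcludedA : List (List Char) :=
  ["instagram.com".toList, "facebook.com".toList, "fb.com".toList, "twitter.com".toList,
   "x.com".toList, "linkedin.com".toList, "youtube.com".toList, "youtu.be".toList,
   "pittimmagine.com".toList, "pittiimmagine.com".toList, "taste.pittimmagine.com".toList,
   "www.pittimmagine.com".toList]

-- _hostname_key: '(netloc or "")' only guards None; on strings it is the identity
def pvHostnameKeyA (netloc : String) : List Char :=
  let h := PySem.Chars.lower netloc.toList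
  if PySem.Chars.startswith h ('w' :: 'w' :: 'w' :: '.' :: []) then PySem.List.slice h (some 4) none
  else h

def is_company_website_host_py (netloc : String) : Bool :=
  let key := pvHostnameKeyA netloc
  if key = [] then false
  else if pvExcludedA.any (fun ex => key == ex || PySem.Chars.endswith key ('.' :: ex)) then false
  else true

-- ===== PORT B =====
-- frozenset("… …".split()) built once
def pvExcludedSetB : PySem.Set (List Char) :=
  PySem.Set.ofList (PySem.Chars.split₀
    ("instagram.com facebook.com fb.com twitter.com x.com linkedin.com " ++
     "youtube.com youtu.be pittimmagine.com pittiimmagine.com " ++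
     "taste.pittimmagine.com www.pittimmagine.com").toList)

-- the 'while True' suffix walk ('suffix in exs' / 'suffix.find(".")' / 'suffix = suffix[dot+1:]');
-- the excluded set is passed as a parameter
def pvSuffixLoopB (exs : PySem.Set (List Char)) (s : List Char) : Bool :=
  if PySem.Set.contains exs s then false
  else
    let dot := PySem.Chars.find s ['.']
    if h : dot < 0 then true
    else
      have : (PySem.List.slice s (some (dot + 1)) none).length < s.length := by
        have h0 : (0:Int) ≤ dot := not_lt.mp h
        have hspec := PySem.Chars.find_spec (s := s) (sub := ['.']) h0
        have hlt : dot.toNat < s.length := by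
          by_contra hge
          rw [not_lt] at hge
          have hp := hspec.1
          rw [List.drop_eq_nil_of_le hge] at hp
          simp at hp
        rw [PySem.List.slice_from s (by omega : (0:Int) ≤ dot + 1)]
        simp only [List.length_drop]
        omega
      pvSuffixLoopB exs (PySem.List.slice s (some (dot + 1)) none)
termination_by s.length

def is_company_website_host_py_alt (netloc : String) : Bool :=
  let h := PySem.Chars.lower netloc.toList
  let suffix := if PySem.List.slice h none (some 4) == 'w' :: 'w' :: 'w' :: '.' :: []
                then PySem.List.slice h (some 4) none else h
  if suffix = [] then false
  else pvSuffixLoopB pvExcludedSetB suffix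

-- ===== PRECONDITION & SPEC =====
def Spec_is_company_website_host_py (netloc : String) (out : Bool) : Prop := out = is_company_website_host_py_alt netloc
instance (netloc : String) (out : Bool) : Decidable (Spec_is_company_website_host_py netloc out) := by unfold Spec_is_company_website_host_py; infer_instance

-- ===== CLAIM (what is proved, stated in full; the proofs are below) =====
def Claim_equal_is_company_website_host_py : Prop := ∀ (netloc : String), Dom_is_company_website_host_py netloc → Spec_is_company_website_host_py netloc (is_company_website_host_py netloc)

-- ===== LEMMAS AND PROOFS =====
set_option maxRecDepth 4000

-- B's frozenset holds exactly A's tuple entries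
theorem pvSetB_mem_iff (t : List Char) : t ∈ pvExcludedSetB ↔ t ∈ pvExcludedA := by
  have hsplit : PySem.Chars.split₀
      ("instagram.com facebook.com fb.com twitter.com x.com linkedin.com " ++
       "youtube.com youtu.be pittimmagine.com pittiimmagine.com " ++
       "taste.pittimmagine.com www.pittimmagine.com").toList = pvExcludedA := by decide
  rw [pvExcludedSetB, hsplit]
  exact PySem.Set.mem_ofList pvExcludedA t

-- the loop returns false exactly when the key itself, or some dot-boundary suffix, is in the set
theorem pvSuffixLoopB_false_iff (exs : PySem.Set (List Char)) (s : List Char) :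
    pvSuffixLoopB exs s = false ↔ (s ∈ exs ∨ ∃ t, ('.' :: t) <:+ s ∧ t ∈ exs) := by
  induction s using (pvSuffixLoopB.induct exs) with
  | case1 s hmem =>
    rw [pvSuffixLoopB, if_pos hmem]
    simp [(PySem.Set.contains_iff exs s).mp hmem]
  | case2 s hmem dot hneg =>
    have hmem' : s ∉ exs := by simpa using hmem
    rw [pvSuffixLoopB, if_neg (by simpa using hmem), dif_pos hneg]
    have hno : ¬ ['.'] <:+: s := by
      have h1 : PySem.Chars.find s ['.'] = -1 :=
        le_antisymm (by omega) (PySem.Chars.neg_one_le_find s ['.'])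
      exact (PySem.Chars.find_eq_neg_one_iff s ['.']).mp h1
    constructor
    · intro h; exact absurd h (by simp)
    · rintro (h | ⟨t, hsuf, _⟩)
      · exact absurd h hmem'
      · exact absurd (List.IsInfix.trans (List.IsPrefix.isInfix ⟨t, rfl⟩) (List.IsSuffix.isInfix hsuf)) hno
  | case3 s hmem dot hneg hdec ih =>
    have hmem' : s ∉ exs := by simpa using hmem
    rw [pvSuffixLoopB, if_neg (by simpa using hmem), dif_neg hneg]
    have h0 : (0:Int) ≤ dot := not_lt.mp hneg
    have hspec := PySem.Chars.find_spec (s := s) (sub := ['.']) h0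
    have hlt : dot.toNat < s.length := by
      by_contra hge
      rw [not_lt] at hge
      have hp := hspec.1
      rw [List.drop_eq_nil_of_le hge] at hp
      simp at hp
    have hs' : PySem.List.slice s (some (dot + 1)) none = s.drop (dot.toNat + 1) := by
      rw [PySem.List.slice_from s (by omega : (0:Int) ≤ dot + 1)]
      congr 1
      omega
    show pvSuffixLoopB exs (PySem.List.slice s (some (dot + 1)) none) = false ↔
        (s ∈ exs ∨ ∃ t, ('.' :: t) <:+ s ∧ t ∈ exs)
    rw [ih, hs']
    have hdropd : s.drop dot.toNat = '.' :: s.drop (dot.toNat + 1) := by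
      rcases hspec.1 with ⟨r, hr⟩
      have h1 : s.drop dot.toNat = '.' :: r := by simpa using hr.symm
      have h2 : r = s.drop (dot.toNat + 1) := by
        have := congrArg (List.drop 1) h1
        simpa [List.drop_drop, Nat.add_comm] using this.symm
      rw [h1, h2]
    constructor
    · rintro (h | ⟨t, hsuf, hmem'⟩)
      · exact Or.inr ⟨s.drop (dot.toNat + 1), by rw [← hdropd]; exact List.drop_suffix _ s, h⟩
      · exact Or.inr ⟨t, hsuf.trans (List.drop_suffix _ s), hmem'⟩
    · rintro (h | ⟨t, hsuf, hmem'⟩)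
      · exact absurd h hmem'
      · -- the dot opening this suffix lies at or after the first dot
        have hdropj : s.drop (s.length - ('.' :: t).length) = '.' :: t :=
          (List.suffix_iff_eq_drop.mp hsuf).symm
        set j := s.length - ('.' :: t).length with hj
        have hjd : dot.toNat ≤ j := by
          by_contra hlt2
          rw [not_le] at hlt2
          exact (hspec.2 j hlt2) (by rw [hdropj]; exact ⟨t, rfl⟩)
        by_cases hjeq : j = dot.toNat
        · left
          rw [hjeq, hdropd] at hdropj
          injection hdropj with _ h2
          rw [h2]; exact hmem'
        · right
          refine ⟨t, ?_, hmem'⟩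
          have hrw : s.drop j = (s.drop (dot.toNat + 1)).drop (j - (dot.toNat + 1)) := by
            rw [List.drop_drop]; congr 1; omega
          rw [hrw] at hdropj
          rw [← hdropj]
          exact List.drop_suffix _ _

-- A's tuple scan matches exactly the same condition
theorem pvAnyA_iff (key : List Char) :
    pvExcludedA.any (fun ex => key == ex || PySem.Chars.endswith key ('.' :: ex)) = true ↔
      (key ∈ pvExcludedA ∨ ∃ t, ('.' :: t) <:+ key ∧ t ∈ pvExcludedA) := by
  rw [List.any_eq_true]
  constructor
  · rintro ⟨ex, hex, hcond⟩
    rcases Bool.or_eq_true_iff.mp hcond with h | h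
    · exact Or.inl ((beq_iff_eq.mp h) ▸ hex)
    · exact Or.inr ⟨ex, (PySem.Chars.endswith_iff key ('.' :: ex)).mp h, hex⟩
  · rintro (h | ⟨t, hsuf, hmem⟩)
    · exact ⟨key, h, by simp⟩
    · exact ⟨t, hmem, by simp [PySem.Chars.endswith_iff, hsuf]⟩

-- ===== VERDICT (by name: the statement is the Claim_ definition above) =====
theorem is_company_website_host_py_spec : Claim_equal_is_company_website_host_py := by
  intro netloc _
  unfold Spec_is_company_website_host_py is_company_website_host_py is_company_website_host_py_alt
  have hkey : (if PySem.List.slice (PySem.Chars.lower netloc.toList) none (some 4) ==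
        'w' :: 'w' :: 'w' :: '.' :: [] then PySem.List.slice (PySem.Chars.lower netloc.toList) (some 4) none
      else PySem.Chars.lower netloc.toList) = pvHostnameKeyA netloc := by
    unfold pvHostnameKeyA
    rw [show ((4:Int)) = ((4:Nat):Int) from rfl, PySem.List.slice_to_natCast]
    cases hsw : PySem.Chars.startswith (PySem.Chars.lower netloc.toList)
        ('w' :: 'w' :: 'w' :: '.' :: []) with
    | false =>
      have hne : List.take 4 (PySem.Chars.lower netloc.toList) ≠ ['w', 'w', 'w', '.'] := by
        intro he
        have hpre : ('w' :: 'w' :: 'w' :: '.' :: []) <+: PySem.Chars.lower netloc.toList :=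
          List.prefix_iff_eq_take.mpr he.symm
        have h2 := (PySem.Chars.startswith_iff _ _).mpr hpre
        rw [hsw] at h2
        exact absurd h2 (by simp)
      simp [hne, hsw]
    | true =>
      have heq : List.take 4 (PySem.Chars.lower netloc.toList) = ['w', 'w', 'w', '.'] := by
        simpa using (List.prefix_iff_eq_take.mp ((PySem.Chars.startswith_iff _ _).mp hsw)).symm
      simp [heq, hsw]
  simp only [hkey]
  set key := pvHostnameKeyA netloc with hk
  by_cases h0 : key = []
  · rw [if_pos h0, if_pos h0]
  · rw [if_neg h0, if_neg h0]
    have hcond : (key ∈ pvExcludedSetB ∨ ∃ t, ('.' :: t) <:+ key ∧ t ∈ pvExcludedSetB) ↔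
        (key ∈ pvExcludedA ∨ ∃ t, ('.' :: t) <:+ key ∧ t ∈ pvExcludedA) := by
      rw [pvSetB_mem_iff]
      refine or_congr Iff.rfl (exists_congr fun t => and_congr Iff.rfl (pvSetB_mem_iff t))
    rcases ha : pvExcludedA.any (fun ex => key == ex || PySem.Chars.endswith key ('.' :: ex)) with _ | _
    · rcases hb : pvSuffixLoopB pvExcludedSetB key with _ | _
      · exfalso
        have h1 := hcond.mp ((pvSuffixLoopB_false_iff pvExcludedSetB key).mp hb)
        have h2 := (pvAnyA_iff key).mpr h1
        rw [ha] at h2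
        exact absurd h2 (by simp)
      · rfl
    · have h1 := hcond.mpr ((pvAnyA_iff key).mp ha)
      rw [(pvSuffixLoopB_false_iff pvExcludedSetB key).mpr h1]
      rfl
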